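-- pv_equiv track=rewrite | github.com/houxinli/genai-playground | tasks/translation/src/utils/text/cleaning.py | detect_and_truncate_repetition
-- ===== SOURCE A (Python) =====
-- def detect_and_truncate_repetition(text: str, max_repeat: int = 20) -> str:
--     """
--     检测并截断重复的文本模式
--
--     Args:
--         text: 要检查的文本
--         max_repeat: 最大重复次数
--
--     Returns:
--         处理后的文本
--     """
--     if not text:
--         return text
--
--     lines = text.split('\n')
--     if len(lines) < 3:
--         return text
--
--     # 检查是否有重复的短行
--     for i in range(len(lines) - max_repeat):
--         if len(lines[i].strip()) <= 1:
--             repeat_count = 1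
--             for j in range(i + 1, len(lines)):
--                 if lines[j].strip() == lines[i].strip():
--                     repeat_count += 1
--                 else:
--                     break
--
--             if repeat_count > max_repeat:
--                 # 截断重复部分
--                 return '\n'.join(lines[:i + 1])
--
--     return text
-- ===== SOURCE B (Python) =====
-- def detect_and_truncate_repetition(text: str, max_repeat: int = 20) -> str:
--     if not text:
--         return text
--     lines = text.split('\n')
--     if len(lines) < 3:
--         return text
--     stripped = [l.strip() for l in lines]
--     start = 0
--     while start < len(lines):
--         v = stripped[start]
--         end = start + 1
--         while end < len(lines) and stripped[end] == v:
--             end += 1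
--         if len(v) <= 1 and end - start > max_repeat:
--             return '\n'.join(lines[:start + 1])
--         start = end
--     return text
-- ===== Notes on version B (the rewrite author's own statement) =====
-- stated objective: alternative
-- what changed: A restarts its forward repeat-scan at every line index (re-stripping lines inside the inner loop); B strips each line once and makes a single run-to-run pass, jumping from each run of equal stripped lines directly to the next, truncating at the first short run longer than max_repeat.
import Mathlib
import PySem

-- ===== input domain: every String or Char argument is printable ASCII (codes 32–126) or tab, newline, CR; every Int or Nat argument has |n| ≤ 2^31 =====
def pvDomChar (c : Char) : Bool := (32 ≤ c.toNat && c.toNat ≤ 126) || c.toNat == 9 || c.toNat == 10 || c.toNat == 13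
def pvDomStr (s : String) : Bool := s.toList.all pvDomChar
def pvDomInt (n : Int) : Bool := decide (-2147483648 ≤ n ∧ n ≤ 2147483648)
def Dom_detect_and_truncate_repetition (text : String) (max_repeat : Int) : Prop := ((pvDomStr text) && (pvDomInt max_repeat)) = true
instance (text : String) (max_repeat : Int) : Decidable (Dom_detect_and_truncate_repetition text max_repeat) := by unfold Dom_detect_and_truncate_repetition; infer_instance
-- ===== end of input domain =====

-- B replaces A's restart-the-scan-at-every-line search by a single run-to-run jump over precomputed
-- stripped lines (objective: alternative/simpler traversal; same return value everywhere A returns).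

-- ===== PORT A =====
-- A's inner `for j in range(i+1, len(lines))` with break: count consecutive following lines whose strip equals tgt
def pvA_count (tgt : String) : List String → Int
  | [] => 0
  | l :: rest => if PySem.Str.strip l = tgt then 1 + pvA_count tgt rest else 0

-- A's outer `for i in range(len(lines) - max_repeat)`; fuel = number of iterations left;
-- `none` = loop fell through; `some ""` marks the IndexError Python raises when i ≥ len(lines) (excluded by Pre_)
def pvA_outer (lines : List String) (max_repeat : Int) : Nat → Nat → Option String
  | _, 0 => none
  | i, fuel + 1 =>
    match PySem.List.pyGet? lines (i : Int) with
    | none => some ""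
    | some li =>
      if PySem.Str.len (PySem.Str.strip li) ≤ 1 then
        let repeat_count : Int := 1 + pvA_count (PySem.Str.strip li) (lines.drop (i + 1))
        if repeat_count > max_repeat then
          some (PySem.Str.join "\n" (PySem.List.slice lines none (some ((i : Int) + 1))))
        else pvA_outer lines max_repeat (i + 1) fuel
      else pvA_outer lines max_repeat (i + 1) fuel

def detect_and_truncate_repetition (text : String) (max_repeat : Int) : String :=
  if text = "" then text
  else
    let lines := (PySem.Str.split? text "\n").getD []
    if lines.length < 3 then text
    else
      match pvA_outer lines max_repeat 0 (((lines.length : Int) - max_repeat).toNat) with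
      | some r => r
      | none => text

-- ===== PORT B =====
-- B's inner `while end < len(lines) and stripped[end] == v: end += 1` (fuel ≥ remaining steps; called with fuel = ss.length)
def pvB_inner (ss : List String) (v : String) : Nat → Nat → Nat
  | e, 0 => e
  | e, fuel + 1 =>
    if e < ss.length ∧ ss.getD e "" = v then pvB_inner ss v (e + 1) fuel else e

-- B's outer `while start < len(lines)` jumping run to run (fuel ≥ remaining iterations; called with fuel = lines.length + 1)
def pvB_outer (text : String) (lines ss : List String) (max_repeat : Int) : Nat → Nat → String
  | _, 0 => text
  | start, fuel + 1 =>
    if start < lines.length then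
      let v := ss.getD start ""
      let e := pvB_inner ss v (start + 1) ss.length
      if PySem.Str.len v ≤ 1 ∧ (e : Int) - (start : Int) > max_repeat then
        PySem.Str.join "\n" (lines.take (start + 1))
      else pvB_outer text lines ss max_repeat e fuel
    else text

def detect_and_truncate_repetition_alt (text : String) (max_repeat : Int) : String :=
  if text = "" then text
  else
    let lines := (PySem.Str.split? text "\n").getD []
    if lines.length < 3 then text
    else pvB_outer text lines (lines.map (fun l => PySem.Str.strip l)) max_repeat 0 (lines.length + 1)

-- ===== PRECONDITION & SPEC =====
-- Pre_ excludes exactly the inputs where A raises IndexError: a negative max_repeat with at least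
-- 3 lines none of which strips to length ≤ 1 (the outer range then runs past the end of `lines`).
def Pre_detect_and_truncate_repetition (text : String) (max_repeat : Int) : Prop :=
  0 ≤ max_repeat ∨ text = "" ∨ ((PySem.Str.split? text "\n").getD []).length < 3 ∨
    ∃ l ∈ (PySem.Str.split? text "\n").getD [], PySem.Str.len (PySem.Str.strip l) ≤ 1

instance (text : String) (max_repeat : Int) : Decidable (Pre_detect_and_truncate_repetition text max_repeat) := by
  unfold Pre_detect_and_truncate_repetition; infer_instance

def pvWitness_detect_and_truncate_repetition : String × Int := ("a\nb\nc", 2)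

def Spec_detect_and_truncate_repetition (text : String) (max_repeat : Int) (out : String) : Prop := out = detect_and_truncate_repetition_alt text max_repeat
instance (text : String) (max_repeat : Int) (out : String) : Decidable (Spec_detect_and_truncate_repetition text max_repeat out) := by unfold Spec_detect_and_truncate_repetition; infer_instance

-- ===== CLAIM (what is proved, stated in full; the proofs are below) =====
def Claim_equal_detect_and_truncate_repetition : Prop := ∀ (text : String) (max_repeat : Int), Dom_detect_and_truncate_repetition text max_repeat → Pre_detect_and_truncate_repetition text max_repeat → Spec_detect_and_truncate_repetition text max_repeat (detect_and_truncate_repetition text max_repeat)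

-- ===== LEMMAS AND PROOFS =====

theorem pv_exists_min {p : Nat → Prop} (h : ∃ n, p n) : ∃ n, p n ∧ ∀ m, m < n → ¬ p m := by
  classical
  obtain ⟨n, hn⟩ := h
  induction n using Nat.strong_induction_on with
  | _ n IH =>
    by_cases h' : ∃ m, m < n ∧ p m
    · obtain ⟨m, hm, hpm⟩ := h'; exact IH m hm hpm
    · exact ⟨n, hn, fun m hm hpm => h' ⟨m, hm, hpm⟩⟩

theorem pvA_count_eq (tgt : String) (ls : List String) :
    pvA_count tgt ls = (((ls.map PySem.Str.strip).takeWhile (fun x => x == tgt)).length : Int) := by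
  induction ls with
  | nil => simp [pvA_count]
  | cons l rest ih =>
    simp only [pvA_count, List.map_cons, List.takeWhile]
    by_cases h : PySem.Str.strip l = tgt
    · simp [h, ih]; ring
    · have hb : (PySem.Str.strip l == tgt) = false := by simpa using h
      simp [h, hb]

theorem pvB_inner_eq (ss : List String) (v : String) :
    ∀ fuel e, ss.length ≤ e + fuel →
      pvB_inner ss v e fuel = e + ((ss.drop e).takeWhile (fun x => x == v)).length := by
  intro fuel
  induction fuel with
  | zero =>
    intro e he
    have : ss.drop e = [] := List.drop_eq_nil_of_le (by omega)
    simp [pvB_inner, this]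
  | succ f ih =>
    intro e he
    by_cases hlt : e < ss.length
    · have hdrop : ss.drop e = ss[e] :: ss.drop (e + 1) := List.drop_eq_getElem_cons hlt
      have hgd : ss.getD e "" = ss[e] := List.getD_eq_getElem ss "" hlt
      by_cases hv : ss.getD e "" = v
      · rw [pvB_inner, if_pos ⟨hlt, hv⟩, ih (e + 1) (by omega), hdrop]
        simp only [List.takeWhile]
        rw [← hgd, hv]
        simp; omega
      · rw [pvB_inner, if_neg (by tauto), hdrop]
        simp only [List.takeWhile]
        rw [← hgd]
        have hb : (ss[e]?.getD "" == v) = false := by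
          simpa [List.getD] using hv
        simp [hb]
    · have : ss.drop e = [] := List.drop_eq_nil_of_le (by omega)
      rw [pvB_inner, if_neg (by tauto), this]
      simp

def pvTrig (ss : List String) (mr : Int) (i : Nat) : Prop :=
  PySem.Str.len (ss.getD i "") ≤ 1 ∧
    mr < 1 + (((ss.drop (i + 1)).takeWhile (fun x => x == ss.getD i "")).length : Int)

-- at an in-range index i the port's branch data coincides with pvTrig's components
theorem pv_step (lines : List String) (i : Nat) (hi : i < lines.length) :
    PySem.Str.strip lines[i] = (List.map (fun l => PySem.Str.strip l) lines).getD i "" ∧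
    pvA_count (PySem.Str.strip lines[i]) (lines.drop (i + 1))
      = ((((List.map (fun l => PySem.Str.strip l) lines).drop (i + 1)).takeWhile
          (fun x => x == (List.map (fun l => PySem.Str.strip l) lines).getD i "")).length : Int) := by
  have h1 : (List.map (fun l => PySem.Str.strip l) lines).getD i "" = PySem.Str.strip lines[i] := by
    rw [List.getD_eq_getElem _ _ (by simpa using hi)]
    simp
  refine ⟨h1.symm, ?_⟩
  rw [pvA_count_eq, ← List.map_drop, h1]

theorem pvA_outer_some (lines : List String) (mr : Int) (i0 : Nat)
    (hlt : i0 < lines.length)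
    (htr : pvTrig (List.map (fun l => PySem.Str.strip l) lines) mr i0)
    (hmin : ∀ j, j < i0 → ¬ pvTrig (List.map (fun l => PySem.Str.strip l) lines) mr j) :
    ∀ fuel i, i ≤ i0 → i0 < i + fuel →
      pvA_outer lines mr i fuel = some (PySem.Str.join "\n" (lines.take (i0 + 1))) := by
  intro fuel
  induction fuel with
  | zero => omega
  | succ f ih =>
    intro i hle hlt2
    have hi : i < lines.length := by omega
    have hget : PySem.List.pyGet? lines (i : Int) = some lines[i] := by
      rw [PySem.List.pyGet?_natCast]; simp [hi]
    obtain ⟨h1, h2⟩ := pv_step lines i hi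
    rw [pvA_outer, hget]
    dsimp only
    by_cases hii : i = i0
    · subst hii
      unfold pvTrig at htr
      rw [← h2] at htr
      rw [← h1] at htr
      rw [if_pos htr.1, if_pos (by have := htr.2; omega)]
      congr 1
      rw [show ((i : Int) + 1) = ((i + 1 : Nat) : Int) by push_cast; ring,
        PySem.List.slice_to_natCast]
    · have hni : ¬ pvTrig (List.map (fun l => PySem.Str.strip l) lines) mr i := hmin i (by omega)
      unfold pvTrig at hni
      rw [← h2] at hni
      rw [← h1] at hni
      split_ifs with hc1 hc2
      · exact absurd ⟨hc1, by omega⟩ hni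
      · exact ih (i + 1) (by omega) (by omega)
      · exact ih (i + 1) (by omega) (by omega)

theorem pvA_outer_none (lines : List String) (mr : Int)
    (hno : ∀ j, j < lines.length → ¬ pvTrig (List.map (fun l => PySem.Str.strip l) lines) mr j) :
    ∀ fuel i, i + fuel ≤ lines.length → pvA_outer lines mr i fuel = none := by
  intro fuel
  induction fuel with
  | zero => intro i _; rfl
  | succ f ih =>
    intro i hle
    have hi : i < lines.length := by omega
    have hget : PySem.List.pyGet? lines (i : Int) = some lines[i] := by
      rw [PySem.List.pyGet?_natCast]; simp [hi]
    obtain ⟨h1, h2⟩ := pv_step lines i hi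
    have hni := hno i hi
    unfold pvTrig at hni
    rw [← h2] at hni
    rw [← h1] at hni
    rw [pvA_outer, hget]
    dsimp only
    split_ifs with hc1 hc2
    · exact absurd ⟨hc1, by omega⟩ hni
    · exact ih (i + 1) (by omega)
    · exact ih (i + 1) (by omega)

-- every stripped line strictly inside the run B's inner loop measured equals the run's value
theorem pv_run_elem (ss : List String) (v : String) (s j : Nat)
    (hj1 : s ≤ j) (hj2 : j - s < ((ss.drop s).takeWhile (fun x => x == v)).length)
    (hs : j < ss.length) : ss[j]'hs = v := by
  have hpre : (ss.drop s).takeWhile (fun x => x == v) <+: ss.drop s := List.takeWhile_prefix _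
  have hlen2 : j - s < (ss.drop s).length := by
    have := hpre.length_le
    omega
  have hght : ((ss.drop s).takeWhile (fun x => x == v))[j - s]'hj2 = (ss.drop s)[j - s]'hlen2 :=
    hpre.getElem hj2
  have hp := List.mem_takeWhile_imp (l := ss.drop s) (p := fun x => x == v)
    (List.getElem_mem hj2)
  rw [hght] at hp
  rw [List.getElem_drop] at hp
  have := beq_iff_eq.mp hp
  rw [← this]
  exact getElem_congr rfl (by omega) (by omega)

theorem pvB_outer_some (text : String) (lines : List String) (mr : Int) (i0 : Nat)
    (ss : List String) (hss : ss = List.map (fun l => PySem.Str.strip l) lines)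
    (hlt : i0 < lines.length)
    (htr : pvTrig ss mr i0)
    (hmin : ∀ j, j < i0 → ¬ pvTrig ss mr j) :
    ∀ fuel start, start ≤ i0 → i0 < start + fuel →
      pvB_outer text lines ss mr start fuel = PySem.Str.join "\n" (lines.take (i0 + 1)) := by
  have hlen : ss.length = lines.length := by rw [hss]; simp
  intro fuel
  induction fuel with
  | zero => omega
  | succ f ih =>
    intro start hle hlt2
    have hsl : start < lines.length := by omega
    rw [pvB_outer, if_pos hsl]
    dsimp only
    rw [pvB_inner_eq ss _ ss.length (start + 1) (by omega)]
    by_cases hii : start = i0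
    · subst hii
      rw [if_pos ⟨htr.1, by have := htr.2; push_cast; omega⟩]
    · have hni := hmin start (by omega)
      unfold pvTrig at hni
      rw [if_neg (by
        rintro ⟨c1, c2⟩
        exact hni ⟨c1, by push_cast at c2; omega⟩)]
      set t := ((ss.drop (start + 1)).takeWhile (fun x => x == ss.getD start "")).length with ht
      have he2 : start + 1 + t ≤ i0 := by
        by_contra hc
        push Not at hc
        have hi01 : start + 1 ≤ i0 := by omega
        have hvi0 : ss[i0]'(by omega) = ss.getD start "" :=
          pv_run_elem ss (ss.getD start "") (start + 1) i0 (by omega) (by omega) (by omega)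
        have hvprev : ss.getD (i0 - 1) "" = ss.getD start "" := by
          by_cases h1 : i0 - 1 = start
          · rw [h1]
          · have h2 : ss[i0 - 1]'(by omega) = ss.getD start "" :=
              pv_run_elem ss (ss.getD start "") (start + 1) (i0 - 1) (by omega) (by omega) (by omega)
            rw [List.getD_eq_getElem ss "" (by omega), h2]
        have hgd0 : ss.getD i0 "" = ss.getD start "" := by
          rw [List.getD_eq_getElem ss "" (by omega), hvi0]
        apply hmin (i0 - 1) (by omega)
        constructor
        · rw [hvprev, ← hgd0]; exact htr.1
        · rw [hvprev]
          have hdrop : ss.drop i0 = ss[i0]'(by omega) :: ss.drop (i0 + 1) :=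
            List.drop_eq_getElem_cons (by omega)
          rw [show i0 - 1 + 1 = i0 by omega, hdrop, hvi0]
          simp only [List.takeWhile_cons, BEq.rfl]
          have h2 := htr.2
          rw [hgd0] at h2
          simp at h2 ⊢
          omega
      exact ih (start + 1 + t) (by omega) (by omega)

theorem pvB_outer_none (text : String) (lines : List String) (mr : Int)
    (ss : List String) (hss : ss = List.map (fun l => PySem.Str.strip l) lines)
    (hno : ∀ j, j < lines.length → ¬ pvTrig ss mr j) :
    ∀ fuel start, lines.length ≤ start + fuel →
      pvB_outer text lines ss mr start fuel = text := by
  have hlen : ss.length = lines.length := by rw [hss]; simp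
  intro fuel
  induction fuel with
  | zero =>
    intro start h
    rw [pvB_outer]
  | succ f ih =>
    intro start h
    by_cases hsl : start < lines.length
    · rw [pvB_outer, if_pos hsl]
      dsimp only
      rw [pvB_inner_eq ss _ ss.length (start + 1) (by omega)]
      have hni := hno start hsl
      unfold pvTrig at hni
      rw [if_neg (by
        rintro ⟨c1, c2⟩
        exact hni ⟨c1, by push_cast at c2; omega⟩)]
      exact ih _ (by omega)
    · rw [pvB_outer, if_neg hsl]

theorem pv_main (text : String) (mr : Int)
    (hpre : Pre_detect_and_truncate_repetition text mr) :
    detect_and_truncate_repetition text mr = detect_and_truncate_repetition_alt text mr := by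
  unfold Pre_detect_and_truncate_repetition at hpre
  unfold detect_and_truncate_repetition detect_and_truncate_repetition_alt
  by_cases h0 : text = ""
  · rw [if_pos h0, if_pos h0]
  rw [if_neg h0, if_neg h0]
  dsimp only
  set lines := (PySem.Str.split? text "\n").getD [] with hlines
  by_cases h3 : lines.length < 3
  · rw [if_pos h3, if_pos h3]
  rw [if_neg h3, if_neg h3]
  set ss := lines.map (fun l => PySem.Str.strip l) with hss
  have hsslen : ss.length = lines.length := by rw [hss]; simp
  by_cases hex : ∃ i, i < lines.length ∧ pvTrig ss mr i
  · obtain ⟨i0, ⟨hi0len, hi0tr⟩, hmin0⟩ := pv_exists_min hex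
    have hmin : ∀ j, j < i0 → ¬ pvTrig ss mr j :=
      fun j hj ht => hmin0 j hj ⟨lt_trans hj hi0len, ht⟩
    have htw : ((ss.drop (i0 + 1)).takeWhile (fun x => x == ss.getD i0 "")).length
        ≤ ss.length - (i0 + 1) := by
      have h1 := (List.takeWhile_prefix (p := fun x => x == ss.getD i0 "")
        (l := ss.drop (i0 + 1))).length_le
      simpa using h1
    have hfuel : i0 < 0 + ((lines.length : Int) - mr).toNat := by
      have h2 := hi0tr.2
      omega
    rw [pvA_outer_some lines mr i0 hi0len hi0tr hmin _ 0 (by omega) hfuel]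
    rw [pvB_outer_some text lines mr i0 ss hss hi0len hi0tr hmin _ 0 (by omega) (by omega)]
  · have hnot : ∀ j, j < lines.length → ¬ pvTrig ss mr j := fun j hj ht => hex ⟨j, hj, ht⟩
    have hmr : 0 ≤ mr := by
      by_contra hneg
      rcases hpre with h | h | h | h
      · omega
      · exact h0 h
      · exact h3 h
      · obtain ⟨l, hl, hshort⟩ := h
        obtain ⟨i, hi, rfl⟩ := List.mem_iff_getElem.mp hl
        refine hnot i hi ⟨?_, ?_⟩
        · rw [hss, List.getD_eq_getElem _ _ (by simpa using hi)]
          simpa using hshort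
        · have : (0:Int) ≤ (((ss.drop (i + 1)).takeWhile (fun x => x == ss.getD i "")).length : Int) := by positivity
          omega
    rw [pvA_outer_none lines mr hnot _ 0 (by omega)]
    rw [pvB_outer_none text lines mr ss hss hnot _ 0 (by omega)]

-- ===== VERDICT (by name: the statement is the Claim_ definition above) =====
theorem detect_and_truncate_repetition_spec : Claim_equal_detect_and_truncate_repetition := by
  intro text mr _hdom hpre
  unfold Spec_detect_and_truncate_repetition
  exact pv_main text mr hpre
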